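-- pv_equiv track=rewrite | github.com/kamila-diana/exercises | Hackerrank/justMaximizeIt.py | just_maximize_it
-- ===== SOURCE A (Python) =====
-- from typing import List
--
-- def just_maximize_it(lists: List[List[int]], m: int):
--     s_values = {0}
--     for list_ in lists:
--         new_s_values = set()
--         for prev_val in s_values:
--             for num in list_:
--                 new_s_values.add((num**2 + prev_val) % m)
--         s_values = new_s_values
--     return max(s_values)
-- ===== SOURCE B (Python) =====
-- def just_maximize_it(lists, m):
--     combos = [[]]
--     for lst in lists:
--         combos = [combo + [x] for combo in combos for x in lst]
--     return max(sum(x * x for x in combo) % m for combo in combos)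
-- ===== Notes on version B (the rewrite author's own statement) =====
-- stated objective: idiomatic
-- what changed: B enumerates the full Cartesian product of the lists and takes the max of sum-of-squares mod m over every combination, instead of A's per-list reachable-residue set DP; Pre_ excludes m == 0 (where A raises ZeroDivisionError except in the degenerate no-lists case, where A's 0 never touches %) and an empty inner list (max of empty set, ValueError), where both programs raise.
-- outside the precondition, e.g. on just_maximize_it([], 0): A returns 0, B raises ZeroDivisionError
import Mathlib
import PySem

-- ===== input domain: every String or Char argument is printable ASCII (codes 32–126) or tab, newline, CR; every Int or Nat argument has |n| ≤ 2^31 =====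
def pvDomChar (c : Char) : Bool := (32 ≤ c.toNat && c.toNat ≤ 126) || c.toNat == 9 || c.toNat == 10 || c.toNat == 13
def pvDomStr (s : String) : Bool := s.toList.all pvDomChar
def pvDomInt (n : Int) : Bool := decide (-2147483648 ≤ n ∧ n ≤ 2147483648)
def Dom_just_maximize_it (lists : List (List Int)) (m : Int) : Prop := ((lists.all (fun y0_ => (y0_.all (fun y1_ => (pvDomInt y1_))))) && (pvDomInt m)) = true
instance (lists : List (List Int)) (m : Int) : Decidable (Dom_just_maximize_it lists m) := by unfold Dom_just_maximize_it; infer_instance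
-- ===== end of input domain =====

-- B re-implements the task by brute force over the Cartesian product of the lists
-- instead of A's reachable-residue-set DP (objective: idiomatic; not faster).

-- ===== PORT A =====
def just_maximize_it (lists : List (List Int)) (m : Int) : Int :=
  let s_values := lists.foldl
    (fun s_values list_ =>
      s_values.foldl
        (fun new_s_values prev_val =>
          list_.foldl
            (fun new_s_values num =>
              PySem.Set.add new_s_values (PySem.Int.mod (num ^ 2 + prev_val) m))
            new_s_values)
        PySem.Set.empty)
    (PySem.Set.ofList [0])
  (PySem.List.max? s_values (fun x => x)).getD 0  -- max of empty set raises: excluded by Pre_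

-- ===== PORT B =====
def just_maximize_it_alt (lists : List (List Int)) (m : Int) : Int :=
  let combos := lists.foldl
    (fun combos lst => combos.flatMap (fun combo => lst.map (fun x => combo ++ [x])))
    [([] : List Int)]
  (PySem.List.max? (combos.map (fun combo =>
      PySem.Int.mod (combo.foldl (fun a x => a + x * x) 0) m)) (fun x => x)).getD 0

-- ===== PRECONDITION & SPEC =====
-- Pre_ excludes exactly the inputs where A raises: m = 0 (ZeroDivisionError from %)
-- and an empty inner list (max() of an empty set, ValueError). B raises there too.
def Pre_just_maximize_it (lists : List (List Int)) (m : Int) : Prop :=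
  m ≠ 0 ∧ ∀ l ∈ lists, l ≠ []
instance (lists : List (List Int)) (m : Int) : Decidable (Pre_just_maximize_it lists m) := by
  unfold Pre_just_maximize_it; infer_instance
def pvWitness_just_maximize_it : List (List Int) × Int := ([[1, 2], [3, 4]], 5)

def Spec_just_maximize_it (lists : List (List Int)) (m : Int) (out : Int) : Prop := out = just_maximize_it_alt lists m
instance (lists : List (List Int)) (m : Int) (out : Int) : Decidable (Spec_just_maximize_it lists m out) := by unfold Spec_just_maximize_it; infer_instance

-- ===== CLAIM (what is proved, stated in full; the proofs are below) =====
def Claim_equal_just_maximize_it : Prop := ∀ (lists : List (List Int)) (m : Int), Dom_just_maximize_it lists m → Pre_just_maximize_it lists m → Spec_just_maximize_it lists m (just_maximize_it lists m)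

-- ===== LEMMAS AND PROOFS =====

-- "c selects one element from each list, in order"
def Sel : List (List Int) → List Int → Prop
  | [], c => c = []
  | l :: ls, c => ∃ n ∈ l, ∃ c', c = n :: c' ∧ Sel ls c'

def sumsq (c : List Int) : Int := c.foldl (fun a x => a + x * x) 0

theorem sumsq_shift (c : List Int) (a : Int) :
    c.foldl (fun a x => a + x * x) a = a + sumsq c := by
  induction c generalizing a with
  | nil => simp [sumsq]
  | cons x t ih => simp only [List.foldl, sumsq] at *; rw [ih, ih (0 + x * x)]; ring

theorem mod_congr (a b m : Int) (hm : m ≠ 0) (h : m ∣ a - b) :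
    PySem.Int.mod a m = PySem.Int.mod b m := by
  have ha := PySem.Int.floordiv_mul_add_mod a m
  have hb := PySem.Int.floordiv_mul_add_mod b m
  obtain ⟨k, hk⟩ := h
  have hdvd : m ∣ PySem.Int.mod a m - PySem.Int.mod b m := by
    refine ⟨k - PySem.Int.floordiv a m + PySem.Int.floordiv b m, ?_⟩
    have hr : m * (k - PySem.Int.floordiv a m + PySem.Int.floordiv b m)
        = m * k - PySem.Int.floordiv a m * m + PySem.Int.floordiv b m * m := by ring
    omega
  have hdvd' : |m| ∣ PySem.Int.mod a m - PySem.Int.mod b m := (abs_dvd _ _).mpr hdvd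
  have habs : |PySem.Int.mod a m - PySem.Int.mod b m| < |m| := by
    rcases lt_or_gt_of_ne hm with hneg | hpos
    · have h1 := PySem.Int.mod_neg_bounds a hneg
      have h2 := PySem.Int.mod_neg_bounds b hneg
      rw [abs_of_neg hneg, abs_lt]
      constructor <;> omega
    · have h1 := PySem.Int.mod_nonneg a hpos
      have h2 := PySem.Int.mod_lt a hpos
      have h3 := PySem.Int.mod_nonneg b hpos
      have h4 := PySem.Int.mod_lt b hpos
      rw [abs_of_pos hpos, abs_lt]
      constructor <;> omega
  have := Int.eq_zero_of_abs_lt_dvd hdvd' habs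
  omega

theorem mod_mod (a m : Int) (hm : m ≠ 0) :
    PySem.Int.mod (PySem.Int.mod a m) m = PySem.Int.mod a m := by
  apply mod_congr _ _ _ hm
  refine ⟨-(PySem.Int.floordiv a m), ?_⟩
  have h0 := PySem.Int.floordiv_mul_add_mod a m
  have hr : m * -(PySem.Int.floordiv a m) = -(PySem.Int.floordiv a m * m) := by ring
  omega

theorem mod_zero_left (m : Int) (hm : m ≠ 0) : PySem.Int.mod 0 m = 0 := by
  have h := PySem.Int.floordiv_mul_add_mod 0 m
  have hdvd : |m| ∣ PySem.Int.mod 0 m := (abs_dvd _ _).mpr ⟨-(PySem.Int.floordiv 0 m), by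
    have hr : m * -(PySem.Int.floordiv 0 m) = -(PySem.Int.floordiv 0 m * m) := by ring
    omega⟩
  have habs : |PySem.Int.mod 0 m| < |m| := by
    rcases lt_or_gt_of_ne hm with hneg | hpos
    · have h1 := PySem.Int.mod_neg_bounds 0 hneg
      rw [abs_of_neg hneg, abs_lt]
      constructor <;> omega
    · have h1 := PySem.Int.mod_nonneg 0 hpos
      have h2 := PySem.Int.mod_lt 0 hpos
      rw [abs_of_pos hpos, abs_lt]
      constructor <;> omega
  exact Int.eq_zero_of_abs_lt_dvd hdvd habs

theorem sumsq_cons (n : Int) (c : List Int) : sumsq (n :: c) = n * n + sumsq c := by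
  have h := sumsq_shift c (0 + n * n)
  simp only [sumsq, List.foldl] at h ⊢
  omega

-- inner loop of A: membership
theorem mem_inner (l : List Int) (f : Int → Int) (ns : PySem.Set Int) (x : Int) :
    x ∈ l.foldl (fun ns num => PySem.Set.add ns (f num)) ns ↔
      x ∈ ns ∨ ∃ num ∈ l, x = f num := by
  induction l generalizing ns with
  | nil => simp
  | cons n t ih =>
    simp only [List.foldl, ih, PySem.Set.mem_add, List.mem_cons]
    constructor
    · rintro ((h | h) | ⟨num, hn, he⟩)
      · exact Or.inl h
      · exact Or.inr ⟨n, Or.inl rfl, h⟩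
      · exact Or.inr ⟨num, Or.inr hn, he⟩
    · rintro (h | ⟨num, (rfl | hn), he⟩)
      · exact Or.inl (Or.inl h)
      · exact Or.inl (Or.inr he)
      · exact Or.inr ⟨num, hn, he⟩

-- outer loop of one A step: membership
theorem mem_step (S : List Int) (l : List Int) (f : Int → Int → Int)
    (acc : PySem.Set Int) (x : Int) :
    x ∈ S.foldl (fun ns prev => l.foldl (fun ns num => PySem.Set.add ns (f num prev)) ns) acc ↔
      x ∈ acc ∨ ∃ prev ∈ S, ∃ num ∈ l, x = f num prev := by
  induction S generalizing acc with
  | nil => simp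
  | cons p t ih =>
    simp only [List.foldl, ih, mem_inner, List.mem_cons]
    constructor
    · rintro ((h | ⟨num, hn, he⟩) | ⟨prev, hp, num, hn, he⟩)
      · exact Or.inl h
      · exact Or.inr ⟨p, Or.inl rfl, num, hn, he⟩
      · exact Or.inr ⟨prev, Or.inr hp, num, hn, he⟩
    · rintro (h | ⟨prev, (rfl | hp), num, hn, he⟩)
      · exact Or.inl (Or.inl h)
      · exact Or.inl (Or.inr ⟨num, hn, he⟩)
      · exact Or.inr ⟨prev, hp, num, hn, he⟩

-- A's fold: full characterization
theorem mem_afold (lists : List (List Int)) (m : Int) (hm : m ≠ 0) :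
    ∀ (S : PySem.Set Int), (∀ s ∈ S, PySem.Int.mod s m = s) →
    ∀ x, x ∈ lists.foldl
      (fun s_values list_ =>
        s_values.foldl
          (fun new_s_values prev_val =>
            list_.foldl
              (fun new_s_values num =>
                PySem.Set.add new_s_values (PySem.Int.mod (num ^ 2 + prev_val) m))
              new_s_values)
          PySem.Set.empty) S ↔
      ∃ s ∈ S, ∃ c, Sel lists c ∧ x = PySem.Int.mod (s + sumsq c) m := by
  induction lists with
  | nil =>
    intro S hS x
    simp only [List.foldl, Sel]
    constructor
    · intro hx
      exact ⟨x, hx, [], rfl, by simp [sumsq, hS x hx]⟩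
    · rintro ⟨s, hs, c, rfl, rfl⟩
      simpa [sumsq, hS s hs] using hs
  | cons l ls ih =>
    intro S hS x
    simp only [List.foldl]
    rw [ih _ (by
      intro s hs
      rw [mem_step] at hs
      rcases hs with h | ⟨prev, _, num, _, rfl⟩
      · simp [PySem.Set.empty] at h
      · exact mod_mod _ _ hm)]
    constructor
    · rintro ⟨s, hs, c, hc, rfl⟩
      rw [mem_step] at hs
      rcases hs with h | ⟨prev, hp, num, hn, rfl⟩
      · simp [PySem.Set.empty] at h
      · refine ⟨prev, hp, num :: c, ⟨num, hn, c, rfl, hc⟩, ?_⟩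
        rw [sumsq_cons]
        apply mod_congr _ _ _ hm
        refine ⟨-(PySem.Int.floordiv (num ^ 2 + prev) m), ?_⟩
        have h0 := PySem.Int.floordiv_mul_add_mod (num ^ 2 + prev) m
        have hsq : num ^ 2 = num * num := by ring
        have hr : m * -(PySem.Int.floordiv (num ^ 2 + prev) m)
            = -(PySem.Int.floordiv (num ^ 2 + prev) m * m) := by ring
        omega
    · rintro ⟨s, hs, c, ⟨num, hn, c', rfl, hc'⟩, rfl⟩
      refine ⟨PySem.Int.mod (num ^ 2 + s) m, ?_, c', hc', ?_⟩
      · rw [mem_step]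
        exact Or.inr ⟨s, hs, num, hn, rfl⟩
      · rw [sumsq_cons]
        apply mod_congr _ _ _ hm
        refine ⟨PySem.Int.floordiv (num ^ 2 + s) m, ?_⟩
        have h0 := PySem.Int.floordiv_mul_add_mod (num ^ 2 + s) m
        have hsq : num ^ 2 = num * num := by ring
        have hr : m * PySem.Int.floordiv (num ^ 2 + s) m
            = PySem.Int.floordiv (num ^ 2 + s) m * m := by ring
        omega

-- B's fold: membership characterization
theorem mem_bfold (lists : List (List Int)) :
    ∀ (acc : List (List Int)) (c : List Int),
    c ∈ lists.foldl
      (fun combos lst => combos.flatMap (fun combo => lst.map (fun x => combo ++ [x]))) acc ↔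
      ∃ pre ∈ acc, ∃ t, Sel lists t ∧ c = pre ++ t := by
  induction lists with
  | nil =>
    intro acc c
    simp only [List.foldl, Sel]
    constructor
    · intro h
      exact ⟨c, h, [], rfl, by simp⟩
    · rintro ⟨pre, hp, t, rfl, rfl⟩
      simpa using hp
  | cons l ls ih =>
    intro acc c
    simp only [List.foldl]
    rw [ih]
    constructor
    · rintro ⟨pre, hp, t, ht, rfl⟩
      rw [List.mem_flatMap] at hp
      obtain ⟨combo, hcm, hp⟩ := hp
      rw [List.mem_map] at hp
      obtain ⟨x, hx, rfl⟩ := hp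
      exact ⟨combo, hcm, x :: t, ⟨x, hx, t, rfl, ht⟩, by simp⟩
    · rintro ⟨pre, hp, t, ⟨n, hn, t', rfl, ht'⟩, rfl⟩
      refine ⟨pre ++ [n], ?_, t', ht', by simp⟩
      rw [List.mem_flatMap]
      exact ⟨pre, hp, List.mem_map.mpr ⟨n, hn, rfl⟩⟩

-- a selection exists when every list is nonempty
theorem sel_exists (lists : List (List Int)) (h : ∀ l ∈ lists, l ≠ []) :
    ∃ c, Sel lists c := by
  induction lists with
  | nil => exact ⟨[], rfl⟩
  | cons l ls ih =>
    obtain ⟨c, hc⟩ := ih (fun l' hl' => h l' (List.mem_cons_of_mem _ hl'))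
    have hl := h l List.mem_cons_self
    cases l with
    | nil => exact absurd rfl hl
    | cons n t => exact ⟨n :: c, n, List.mem_cons_self, c, rfl, hc⟩

-- max over two member-equivalent nonempty lists is the same value
theorem max_ext (xs ys : List Int) (h : ∀ x, x ∈ xs ↔ x ∈ ys) (hne : xs ≠ []) :
    (PySem.List.max? xs (fun x => x)).getD 0 = (PySem.List.max? ys (fun x => x)).getD 0 := by
  have hyne : ys ≠ [] := by
    cases xs with
    | nil => exact absurd rfl hne
    | cons a t =>
      intro hy
      have := (h a).mp List.mem_cons_self
      simp [hy] at this
  obtain ⟨a, ha⟩ := Option.ne_none_iff_exists'.mp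
    (fun hn => hne ((PySem.List.max?_eq_none_iff xs (fun x => x)).mp hn))
  obtain ⟨b, hb⟩ := Option.ne_none_iff_exists'.mp
    (fun hn => hyne ((PySem.List.max?_eq_none_iff ys (fun x => x)).mp hn))
  have hma := PySem.List.max?_mem ha
  have hmb := PySem.List.max?_mem hb
  have h1 := PySem.List.max?_isMax ha b ((h b).mpr hmb)
  have h2 := PySem.List.max?_isMax hb a ((h a).mp hma)
  simp only [ha, hb, Option.getD_some]
  omega

-- ===== VERDICT (by name: the statement is the Claim_ definition above) =====
theorem just_maximize_it_spec : Claim_equal_just_maximize_it := by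
  intro lists m _ hpre
  obtain ⟨hm, hle⟩ := hpre
  unfold Spec_just_maximize_it just_maximize_it just_maximize_it_alt
  apply max_ext
  · intro x
    rw [mem_afold lists m hm (PySem.Set.ofList [0]) (by
        intro s hs
        rw [PySem.Set.mem_ofList] at hs
        simp only [List.mem_singleton] at hs
        subst hs
        exact mod_zero_left m hm)]
    constructor
    · rintro ⟨s, hs, c, hc, rfl⟩
      rw [PySem.Set.mem_ofList] at hs
      simp only [List.mem_singleton] at hs
      subst hs
      rw [List.mem_map]
      refine ⟨c, ?_, by simp [sumsq]⟩
      rw [mem_bfold]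
      exact ⟨[], List.mem_singleton.mpr rfl, c, hc, by simp⟩
    · intro hx
      rw [List.mem_map] at hx
      obtain ⟨c, hc, rfl⟩ := hx
      rw [mem_bfold] at hc
      obtain ⟨pre, hp, t, ht, rfl⟩ := hc
      simp only [List.mem_singleton] at hp
      subst hp
      refine ⟨0, (PySem.Set.mem_ofList _ _).mpr (List.mem_singleton.mpr rfl), t, ?_, by simp [sumsq]⟩
      simpa using ht
  · obtain ⟨c, hc⟩ := sel_exists lists hle
    intro hnil
    have hmem : PySem.Int.mod (0 + sumsq c) m ∈ ([] : List Int) := by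
      rw [← hnil, mem_afold lists m hm (PySem.Set.ofList [0]) (by
        intro s hs
        rw [PySem.Set.mem_ofList] at hs
        simp only [List.mem_singleton] at hs
        subst hs
        exact mod_zero_left m hm)]
      exact ⟨0, (PySem.Set.mem_ofList _ _).mpr (List.mem_singleton.mpr rfl), c, hc, rfl⟩
    simp at hmem
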